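-- pv_equiv track=rewrite | github.com/beiercm/ProjectEuler | Python/LargestProd.py | genListFromInt
-- ===== SOURCE A (Python) =====
-- def genListFromInt(n):
-- 	subList = []
-- 	div = 10
-- 	numCount = 50
--
-- 	while(numCount > 0):
-- 		subList.append(n % div)
-- 		n //= div
-- 		numCount -= 1
--
-- 	return subList
-- ===== SOURCE B (Python) =====
-- def genListFromInt(n):
--     # Divide and conquer: split the 50-digit window in half with one big divmod,
--     # then recurse on each half; low half's digits come first.
--     def digits(m, k):
--         if k == 1:
--             return [m % 10]
--         h = k // 2
--         q, r = divmod(m, 10 ** h)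
--         return digits(r, h) + digits(q, k - h)
--     return digits(n, 50)
-- ===== Notes on version B (the rewrite author's own statement) =====
-- stated objective: alternative
-- what changed: Replaces the sequential while-loop that repeatedly divides a running quotient by ten with a recursive divide-and-conquer that splits the fixed digit window in half with one big divmod and recurses on the low and high halves.
import Mathlib
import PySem

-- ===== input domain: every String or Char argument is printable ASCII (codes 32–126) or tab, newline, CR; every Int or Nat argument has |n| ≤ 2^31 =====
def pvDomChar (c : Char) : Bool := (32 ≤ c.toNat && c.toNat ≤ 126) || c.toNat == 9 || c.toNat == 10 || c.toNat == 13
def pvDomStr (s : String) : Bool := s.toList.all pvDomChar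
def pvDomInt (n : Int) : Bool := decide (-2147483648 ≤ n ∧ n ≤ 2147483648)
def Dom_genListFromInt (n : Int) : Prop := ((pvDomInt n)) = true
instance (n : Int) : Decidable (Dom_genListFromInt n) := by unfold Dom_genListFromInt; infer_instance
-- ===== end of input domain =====

-- B replaces A's sequential digit-by-digit while loop with a recursive divide-and-conquer
-- splitting the 50-digit window in half via one divmod by 10^h; objective: alternative.

-- ===== PORT A =====
-- the while loop: state (n, numCount, subList); numCount counts down from 50
def genListFromIntLoop (n : Int) (numCount : Nat) (subList : List Int) : List Int :=
  match numCount with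
  | 0 => subList
  | k + 1 => genListFromIntLoop (PySem.Int.floordiv n 10) k (subList ++ [PySem.Int.mod n 10])

def genListFromInt (n : Int) : List Int :=
  genListFromIntLoop n 50 []

-- ===== PORT B =====
-- digits(m, k): if k == 1 return [m % 10]; else split at h = k // 2 with divmod(m, 10**h).
-- (Python's digits is only ever called with k ≥ 1; the k = 0 branch makes the Lean recursion total.)
def genListFromIntDigits (m : Int) (k : Nat) : List Int :=
  match k with
  | 0 => []
  | 1 => [PySem.Int.mod m 10]
  | j + 2 =>
    let h := (j + 2) / 2
    genListFromIntDigits (PySem.Int.mod m ((10 : Int) ^ h)) h ++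
      genListFromIntDigits (PySem.Int.floordiv m ((10 : Int) ^ h)) ((j + 2) - h)
termination_by k
decreasing_by all_goals omega

def genListFromInt_alt (n : Int) : List Int :=
  genListFromIntDigits n 50

-- ===== PRECONDITION & SPEC =====
def Spec_genListFromInt (n : Int) (out : List Int) : Prop := out = genListFromInt_alt n
instance (n : Int) (out : List Int) : Decidable (Spec_genListFromInt n out) := by unfold Spec_genListFromInt; infer_instance

-- ===== CLAIM (what is proved, stated in full; the proofs are below) =====
def Claim_equal_genListFromInt : Prop := ∀ (n : Int), Dom_genListFromInt n → Spec_genListFromInt n (genListFromInt n)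

-- ===== LEMMAS AND PROOFS =====

-- the common characterisation: digit i is (n / 10^i) % 10 (ediv/emod; divisors positive)
def pvDig (n : Int) (i : Nat) : Int := (n / (10 : Int) ^ i) % 10

theorem pv_fd_chain (n : Int) (i : Nat) :
    PySem.Int.floordiv (PySem.Int.floordiv n 10) ((10 : Int) ^ i)
      = PySem.Int.floordiv n ((10 : Int) ^ (i + 1)) := by
  rw [PySem.Int.floordiv_eq_ediv_of_pos (b := 10) (by norm_num),
      PySem.Int.floordiv_eq_ediv_of_pos (by positivity),
      PySem.Int.floordiv_eq_ediv_of_pos (by positivity)]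
  rw [Int.ediv_ediv_of_nonneg (by norm_num), pow_succ, mul_comm ((10:Int)^i) 10]

theorem pv_loop_spec (k : Nat) : ∀ (n : Int) (acc : List Int),
    genListFromIntLoop n k acc = acc ++ (List.range k).map (pvDig n) := by
  induction k with
  | zero => intro n acc; simp [genListFromIntLoop]
  | succ k ih =>
      intro n acc
      rw [genListFromIntLoop, ih, List.range_succ_eq_map]
      simp only [List.map_cons, List.map_map, List.append_assoc, List.cons_append]
      congr 2
      · simp [pvDig]
      · apply List.map_congr_left
        intro i _
        simp only [Function.comp_apply, pvDig]
        rw [← PySem.Int.floordiv_eq_ediv_of_pos (a := PySem.Int.floordiv n 10) (by positivity),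
            pv_fd_chain, PySem.Int.floordiv_eq_ediv_of_pos (by positivity)]

-- low digits: digit i of (n emod 10^h) equals digit i of n, for i < h
theorem pv_dig_emod (n : Int) (h i : Nat) (hi : i < h) :
    pvDig (n % (10 : Int) ^ h) i = pvDig n i := by
  have e0 : ((10 : Int) ^ i) ≠ 0 := by positivity
  have hrep : n = n % (10 : Int) ^ h + ((10 : Int) ^ (h - i - 1) * (n / 10 ^ h)) * 10 * 10 ^ i := by
    have h1 : ((10 : Int) ^ (h - i - 1) * (n / 10 ^ h)) * 10 * 10 ^ i
        = (10 : Int) ^ h * (n / 10 ^ h) := by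
      have h2 : (10 : Int) ^ (h - i - 1) * 10 * 10 ^ i = 10 ^ h := by
        rw [mul_right_comm, ← pow_add, ← pow_succ]
        congr 1
        omega
      calc ((10 : Int) ^ (h - i - 1) * (n / 10 ^ h)) * 10 * 10 ^ i
          = ((10 : Int) ^ (h - i - 1) * 10 * 10 ^ i) * (n / 10 ^ h) := by ring
        _ = (10 : Int) ^ h * (n / 10 ^ h) := by rw [h2]
    rw [h1]
    have := Int.emod_add_mul_ediv n ((10 : Int) ^ h)
    linarith
  unfold pvDig
  conv_rhs => rw [hrep]
  rw [Int.add_mul_ediv_right _ _ e0]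
  generalize n % (10 : Int) ^ h / 10 ^ i = x
  generalize (10 : Int) ^ (h - i - 1) * (n / 10 ^ h) = b
  omega

theorem pv_dig_ediv (n : Int) (h j : Nat) :
    pvDig (n / (10 : Int) ^ h) j = pvDig n (h + j) := by
  unfold pvDig
  rw [Int.ediv_ediv_of_nonneg (by positivity : (0 : Int) ≤ (10 : Int) ^ h), ← pow_add]

theorem pv_digits_spec (k : Nat) : ∀ (n : Int),
    genListFromIntDigits n k = (List.range k).map (pvDig n) := by
  induction k using Nat.strong_induction_on with
  | _ k ih =>
    intro n
    match k with
    | 0 => simp [genListFromIntDigits]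
    | 1 =>
        simp [genListFromIntDigits, pvDig]
    | (j + 2) =>
        rw [genListFromIntDigits]
        have hh : (j + 2) / 2 < j + 2 := by omega
        have hh2 : (j + 2) - (j + 2) / 2 < j + 2 := by omega
        rw [ih _ hh, ih _ hh2]
        set h := (j + 2) / 2 with hdef
        rw [PySem.Int.mod_eq_emod_of_pos (by positivity),
            PySem.Int.floordiv_eq_ediv_of_pos (by positivity)]
        have hsum : j + 2 = h + (j + 2 - h) := by omega
        conv_rhs => rw [hsum]
        rw [List.range_add, List.map_append, List.map_map]
        congr 1
        · apply List.map_congr_left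
          intro i hi
          exact pv_dig_emod n h i (List.mem_range.mp hi)
        · apply List.map_congr_left
          intro j' _
          simp only [Function.comp_apply]
          exact pv_dig_ediv n h j'

-- ===== VERDICT (by name: the statement is the Claim_ definition above) =====
theorem genListFromInt_spec : Claim_equal_genListFromInt := by
  intro n _
  show genListFromInt n = genListFromInt_alt n
  rw [genListFromInt, genListFromInt_alt, pv_loop_spec, pv_digits_spec, List.nil_append]
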